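-- pv_equiv track=rewrite | github.com/eldariont/svim | SVIM_fullread.py | analyze_cigar_indel
-- ===== SOURCE A (Python) =====
-- def analyze_cigar_indel(tuples, min_length):
--     """Parses CIGAR tuples (op, len) and returns Indels with a length > minLength"""
--     pos = 0
--     indels = []
--     for operation, length in tuples:
--         if operation == 0:                     # alignment match
--             pos += length
--         elif operation == 1:                   # insertion
--             if length >= min_length:
--                 indels.append((pos, length, 'ins'))
--         elif operation == 2:                   # deletion
--             if length >= min_length:
--                 indels.append((pos, length, 'del'))
--             pos += length
--         elif operation == 7 or operation == 8:        # match or mismatch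
--             pos += length
--     return indels
-- ===== SOURCE B (Python) =====
-- def analyze_cigar_indel(tuples, min_length):
--     """Parses CIGAR tuples (op, len) and returns Indels with a length > minLength"""
--     positions = []
--     pos = 0
--     for op, length in tuples:
--         positions.append(pos)
--         if op in (0, 2, 7, 8):
--             pos += length
--     return [(p, length, 'ins' if op == 1 else 'del')
--             for p, (op, length) in zip(positions, tuples)
--             if op in (1, 2) and length >= min_length]
-- ===== Notes on version B (the rewrite author's own statement) =====
-- stated objective: alternative
-- what changed: Splits the single stateful loop into two passes: one pass builds the pre-advance reference position of every tuple, then a comprehension over zip(positions, tuples) selects the indels; no shared pos/indels state in the selection.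
import Mathlib
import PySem

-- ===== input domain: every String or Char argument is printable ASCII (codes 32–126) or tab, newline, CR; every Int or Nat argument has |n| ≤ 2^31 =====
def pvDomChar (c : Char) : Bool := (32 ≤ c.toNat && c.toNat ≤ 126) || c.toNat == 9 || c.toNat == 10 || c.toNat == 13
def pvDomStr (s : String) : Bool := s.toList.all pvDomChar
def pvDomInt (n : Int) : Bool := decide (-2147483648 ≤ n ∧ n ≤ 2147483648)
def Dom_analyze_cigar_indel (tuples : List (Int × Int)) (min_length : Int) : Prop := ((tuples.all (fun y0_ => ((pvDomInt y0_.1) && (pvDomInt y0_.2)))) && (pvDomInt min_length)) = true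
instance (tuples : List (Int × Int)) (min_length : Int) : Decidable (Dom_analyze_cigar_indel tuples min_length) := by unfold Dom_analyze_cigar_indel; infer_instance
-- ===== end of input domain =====

-- B separates position-accumulation from indel-selection into two passes (same O(n) cost, different decomposition).


-- ===== PORT A =====
def analyze_cigar_indel (tuples : List (Int × Int)) (min_length : Int) : List (Int × Int × String) :=
  (tuples.foldl (fun (st : Int × List (Int × Int × String)) t =>
      let pos := st.1
      let indels := st.2
      let operation := t.1
      let length := t.2
      if operation == 0 then (pos + length, indels)
      else if operation == 1 then
        (pos, if length ≥ min_length then indels ++ [(pos, length, "ins")] else indels)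
      else if operation == 2 then
        (pos + length, if length ≥ min_length then indels ++ [(pos, length, "del")] else indels)
      else if operation == 7 || operation == 8 then (pos + length, indels)
      else (pos, indels)) (0, [])).2

-- ===== PORT B =====
-- first pass of B: the pre-advance position of each tuple
def pvPositions : List (Int × Int) → Int → List Int
  | [], _ => []
  | t :: rest, pos =>
      pos :: pvPositions rest (if t.1 == 0 || t.1 == 2 || t.1 == 7 || t.1 == 8 then pos + t.2 else pos)

def analyze_cigar_indel_alt (tuples : List (Int × Int)) (min_length : Int) : List (Int × Int × String) :=
  ((pvPositions tuples 0).zip tuples).filterMap (fun pt =>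
    let p := pt.1
    let op := pt.2.1
    let length := pt.2.2
    if (op == 1 || op == 2) && length ≥ min_length then
      some (p, length, if op == 1 then "ins" else "del")
    else none)

-- ===== PRECONDITION & SPEC =====
def Spec_analyze_cigar_indel (tuples : List (Int × Int)) (min_length : Int) (out : List (Int × Int × String)) : Prop := out = analyze_cigar_indel_alt tuples min_length
instance (tuples : List (Int × Int)) (min_length : Int) (out : List (Int × Int × String)) : Decidable (Spec_analyze_cigar_indel tuples min_length out) := by unfold Spec_analyze_cigar_indel; infer_instance

-- ===== CLAIM (what is proved, stated in full; the proofs are below) =====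
def Claim_equal_analyze_cigar_indel : Prop := ∀ (tuples : List (Int × Int)) (min_length : Int), Dom_analyze_cigar_indel tuples min_length → Spec_analyze_cigar_indel tuples min_length (analyze_cigar_indel tuples min_length)

-- ===== LEMMAS AND PROOFS =====

-- ===== VERDICT (by name: the statement is the Claim_ definition above) =====
lemma pv_fold_eq (min_length : Int) (tuples : List (Int × Int)) :
    ∀ (pos : Int) (acc : List (Int × Int × String)),
      (tuples.foldl (fun (st : Int × List (Int × Int × String)) t =>
        let pos := st.1
        let indels := st.2
        let operation := t.1
        let length := t.2
        if operation == 0 then (pos + length, indels)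
        else if operation == 1 then
          (pos, if length ≥ min_length then indels ++ [(pos, length, "ins")] else indels)
        else if operation == 2 then
          (pos + length, if length ≥ min_length then indels ++ [(pos, length, "del")] else indels)
        else if operation == 7 || operation == 8 then (pos + length, indels)
        else (pos, indels)) (pos, acc)).2
      = acc ++ ((pvPositions tuples pos).zip tuples).filterMap (fun pt =>
          let p := pt.1
          let op := pt.2.1
          let length := pt.2.2
          if (op == 1 || op == 2) && length ≥ min_length then
            some (p, length, if op == 1 then "ins" else "del")
          else none) := by
  induction tuples with
  | nil => intro pos acc; simp [pvPositions]
  | cons t rest ih =>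
    intro pos acc
    simp only [List.foldl_cons, pvPositions, List.zip_cons_cons, List.filterMap_cons]
    by_cases h0 : t.1 = 0
    · simpa [h0] using ih (pos + t.2) acc
    · by_cases h1 : t.1 = 1
      · by_cases hl : t.2 ≥ min_length
        · simpa [h0, h1, hl, List.append_assoc] using ih pos (acc ++ [(pos, t.2, "ins")])
        · simpa [h0, h1, hl] using ih pos acc
      · by_cases h2 : t.1 = 2
        · by_cases hl : t.2 ≥ min_length
          · simpa [h0, h1, h2, hl, List.append_assoc] using ih (pos + t.2) (acc ++ [(pos, t.2, "del")])
          · simpa [h0, h1, h2, hl] using ih (pos + t.2) acc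
        · by_cases h7 : t.1 = 7
          · simpa [h0, h1, h2, h7] using ih (pos + t.2) acc
          · by_cases h8 : t.1 = 8
            · simpa [h0, h1, h2, h7, h8] using ih (pos + t.2) acc
            · simpa [h0, h1, h2, h7, h8] using ih pos acc

theorem analyze_cigar_indel_spec : Claim_equal_analyze_cigar_indel := by
  intro tuples min_length _
  unfold Spec_analyze_cigar_indel analyze_cigar_indel analyze_cigar_indel_alt
  simpa using pv_fold_eq min_length tuples 0 []
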